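-- pv_equiv track=rewrite | github.com/thanhhau097/bmga | evaluate_labels_detection.py | filter_y_polygons
-- ===== SOURCE A (Python) =====
-- def filter_y_polygons(polygons, img_width, image):
--     # first, draw a line along x axis then count the number of y_label_boxes that intersect with the line
--     max_count = 0
--     max_count_line_x = 0
--
--     for line_x in range(img_width):
--         count = 0
--         for polygon in polygons:
--             if polygon:
--                 min_x = min([x[0] for x in polygon])
--                 max_x = max([x[0] for x in polygon])
--             else:
--                 min_x = 0
--                 max_x = 0
--             w = max_x - min_x
--             if min_x + w // 4 <= line_x <= max_x - w // 4:
--                 count += 1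
--         if count > max_count:
--             max_count = count
--             max_count_line_x = line_x
--
--     # filter out y_label_boxes that intersect with the line
--     filtered_y_label_polygons = []
--     for polygon in polygons:
--         if polygon:
--             min_x = min([x[0] for x in polygon])
--             max_x = max([x[0] for x in polygon])
--         else:
--             min_x = 0
--             max_x = 0
--         if min_x <= max_count_line_x <= max_x:
--             filtered_y_label_polygons.append(polygon)
--
--     return filtered_y_label_polygons
-- ===== SOURCE B (Python) =====
-- def filter_y_polygons(polygons, img_width, image):
--     # Sweep over candidate x positions (interval starts) instead of every pixel column.
--     def span(polygon):
--         if polygon: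
--             xs = [pt[0] for pt in polygon]
--             return (min(xs), max(xs))
--         return (0, 0)
--
--     def lo_of(s):
--         return s[0] + (s[1] - s[0]) // 4
--
--     def hi_of(s):
--         return s[1] - (s[1] - s[0]) // 4
--
--     spans = [span(p) for p in polygons]
--     candidates = sorted({max(lo_of(s), 0) for s in spans if max(lo_of(s), 0) < img_width})
--     best_count, best_x = 0, 0
--     for c in candidates:
--         cnt = sum(1 for s in spans if lo_of(s) <= c <= hi_of(s))
--         if cnt > best_count:
--             best_count, best_x = cnt, c
--     return [poly for poly, s in zip(polygons, spans) if s[0] <= best_x <= s[1]]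
-- ===== Notes on version B (the rewrite author's own statement) =====
-- stated objective: faster
-- what changed: Instead of scanning every pixel column in range(img_width) and recomputing each polygon's min/max per column, B precomputes the spans once and sweeps only the sorted set of candidate interval-start columns, which provably contains the first column of maximal overlap.
import Mathlib
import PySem

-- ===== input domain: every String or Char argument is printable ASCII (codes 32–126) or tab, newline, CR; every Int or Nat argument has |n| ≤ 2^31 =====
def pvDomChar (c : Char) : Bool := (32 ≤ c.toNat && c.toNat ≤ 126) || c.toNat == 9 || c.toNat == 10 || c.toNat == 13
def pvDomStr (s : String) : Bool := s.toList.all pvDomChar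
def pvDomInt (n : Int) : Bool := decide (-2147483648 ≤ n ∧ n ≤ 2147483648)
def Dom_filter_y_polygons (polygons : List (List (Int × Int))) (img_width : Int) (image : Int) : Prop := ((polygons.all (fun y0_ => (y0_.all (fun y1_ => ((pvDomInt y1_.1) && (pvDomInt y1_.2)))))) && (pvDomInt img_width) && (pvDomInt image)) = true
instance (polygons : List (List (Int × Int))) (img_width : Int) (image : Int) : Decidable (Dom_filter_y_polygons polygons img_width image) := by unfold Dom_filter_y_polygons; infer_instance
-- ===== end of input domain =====

-- B replaces A's scan over every pixel column with a sweep over the sorted candidate interval starts; same return value.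

-- ===== PORT A =====
-- (min_x, max_x) of a polygon's x-coordinates, with A's `else` branch (0, 0) for an empty polygon
def pvSpan (polygon : List (Int × Int)) : Int × Int :=
  if polygon ≠ [] then
    ((PySem.List.min? (polygon.map Prod.fst) (fun x => x)).getD 0,
     (PySem.List.max? (polygon.map Prod.fst) (fun x => x)).getD 0)
  else (0, 0)

-- A's inner loop: the count for one value of line_x
def pvCountA (polygons : List (List (Int × Int))) (line_x : Int) : Int :=
  polygons.foldl (fun count polygon =>
    let s := pvSpan polygon
    let w := s.2 - s.1
    if s.1 + PySem.Int.floordiv w 4 ≤ line_x ∧ line_x ≤ s.2 - PySem.Int.floordiv w 4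
    then count + 1 else count) 0

def filter_y_polygons (polygons : List (List (Int × Int))) (img_width : Int) (image : Int) : List (List (Int × Int)) :=
  let best := (PySem.List.pyRange 0 img_width 1).foldl
    (fun st line_x =>
      if pvCountA polygons line_x > st.1 then (pvCountA polygons line_x, line_x) else st)
    ((0 : Int), (0 : Int))
  polygons.foldl (fun acc polygon =>
    let s := pvSpan polygon
    if s.1 ≤ best.2 ∧ best.2 ≤ s.2 then acc ++ [polygon] else acc) []

-- ===== PORT B =====
def pvLo (s : Int × Int) : Int := s.1 + PySem.Int.floordiv (s.2 - s.1) 4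
def pvHi (s : Int × Int) : Int := s.2 - PySem.Int.floordiv (s.2 - s.1) 4

-- B's count at a candidate column, over the precomputed spans
def pvCountB (spans : List (Int × Int)) (c : Int) : Int :=
  spans.foldl (fun cnt s => if pvLo s ≤ c ∧ c ≤ pvHi s then cnt + 1 else cnt) 0

def filter_y_polygons_alt (polygons : List (List (Int × Int))) (img_width : Int) (image : Int) : List (List (Int × Int)) :=
  let spans := polygons.map pvSpan
  let candidates := PySem.List.sorted
    (PySem.Set.ofList (spans.filterMap (fun s =>
      if max (pvLo s) 0 < img_width then some (max (pvLo s) 0) else none)))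
    (fun x => x) false
  let best := candidates.foldl
    (fun st c => if pvCountB spans c > st.1 then (pvCountB spans c, c) else st)
    ((0 : Int), (0 : Int))
  ((polygons.zip spans).filter (fun ps => decide (ps.2.1 ≤ best.2 ∧ best.2 ≤ ps.2.2))).map Prod.fst

-- ===== PRECONDITION & SPEC =====
def Spec_filter_y_polygons (polygons : List (List (Int × Int))) (img_width : Int) (image : Int) (out : List (List (Int × Int))) : Prop := out = filter_y_polygons_alt polygons img_width image
instance (polygons : List (List (Int × Int))) (img_width : Int) (image : Int) (out : List (List (Int × Int))) : Decidable (Spec_filter_y_polygons polygons img_width image out) := by unfold Spec_filter_y_polygons; infer_instance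

-- ===== CLAIM (what is proved, stated in full; the proofs are below) =====
def Claim_equal_filter_y_polygons : Prop := ∀ (polygons : List (List (Int × Int))) (img_width : Int) (image : Int), Dom_filter_y_polygons polygons img_width image → Spec_filter_y_polygons polygons img_width image (filter_y_polygons polygons img_width image)

-- ===== LEMMAS AND PROOFS =====

-- does span s cover column x after shrinking by a quarter of the width on each side
def pvCover (x : Int) (s : Int × Int) : Bool := decide (pvLo s ≤ x ∧ x ≤ pvHi s)
-- the count both programs compute at column x
def pvF (spans : List (Int × Int)) (x : Int) : Int := (spans.countP (pvCover x) : Int)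
-- the shared "strict improvement" accumulator step
def pvStep (f : Int → Int) (st : Int × Int) (x : Int) : Int × Int := if f x > st.1 then (f x, x) else st

lemma pvStep_fst_le (f : Int → Int) (st : Int × Int) (x : Int) : st.1 ≤ (pvStep f st x).1 := by
  unfold pvStep; split_ifs with h
  · simpa using le_of_lt h
  · exact le_refl _

lemma pvStep_fst_ge (f : Int → Int) (st : Int × Int) (x : Int) : f x ≤ (pvStep f st x).1 := by
  unfold pvStep; split_ifs with h
  · simp
  · omega

lemma pvStep_skip (f : Int → Int) (st : Int × Int) (x : Int) (h : f x ≤ st.1) : pvStep f st x = st := by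
  unfold pvStep; split_ifs with h'
  · omega
  · rfl

-- the main sweep lemma: skipping non-candidate columns does not change the fold,
-- provided every skipped column is dominated by an earlier candidate (or by the start state)
lemma pv_foldl_step_filter (f : Int → Int) (p : Int → Bool) :
    ∀ (L : List Int) (st : Int × Int), L.Pairwise (· < ·) →
    (∀ x ∈ L, p x = false → f x ≤ st.1 ∨ ∃ c ∈ L, p c = true ∧ c < x ∧ f x ≤ f c) →
    L.foldl (pvStep f) st = (L.filter p).foldl (pvStep f) st := by
  intro L
  induction L with
  | nil => intro st _ _; rfl
  | cons x rest ih =>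
    intro st hpw h
    have hx : ∀ y ∈ rest, x < y := fun y hy => (List.pairwise_cons.1 hpw).1 y hy
    have hrest : rest.Pairwise (· < ·) := (List.pairwise_cons.1 hpw).2
    cases hpx : p x with
    | true =>
      simp only [List.foldl_cons, List.filter_cons, hpx, if_true]
      apply ih _ hrest
      intro y hy hpy
      rcases h y (List.mem_cons_of_mem _ hy) hpy with hle | ⟨c, hc, hpc, hcx, hfc⟩
      · exact Or.inl (le_trans hle (pvStep_fst_le f st x))
      · rcases List.mem_cons.1 hc with rfl | hc'
        · exact Or.inl (le_trans hfc (pvStep_fst_ge f st c))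
        · exact Or.inr ⟨c, hc', hpc, hcx, hfc⟩
    | false =>
      have hskip : pvStep f st x = st := by
        rcases h x List.mem_cons_self hpx with hle | ⟨c, hc, hpc, hcx, _⟩
        · exact pvStep_skip f st x hle
        · rcases List.mem_cons.1 hc with rfl | hc'
          · omega
          · exact absurd hcx (not_lt.2 (le_of_lt (hx c hc')))
      simp only [List.foldl_cons, List.filter_cons, hpx, hskip]
      apply ih _ hrest
      intro y hy hpy
      rcases h y (List.mem_cons_of_mem _ hy) hpy with hle | ⟨c, hc, hpc, hcx, hfc⟩
      · exact Or.inl hle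
      · rcases List.mem_cons.1 hc with rfl | hc'
        · simp [hpx] at hpc
        · exact Or.inr ⟨c, hc', hpc, hcx, hfc⟩

-- two strictly increasing lists with the same members are equal
lemma pv_eq_of_pairwise_lt_of_mem (l₁ l₂ : List Int)
    (h₁ : l₁.Pairwise (· < ·)) (h₂ : l₂.Pairwise (· < ·))
    (hmem : ∀ x, x ∈ l₁ ↔ x ∈ l₂) : l₁ = l₂ := by
  have n₁ : l₁.Nodup := h₁.imp (fun h => ne_of_lt h)
  have n₂ : l₂.Nodup := h₂.imp (fun h => ne_of_lt h)
  have hperm : l₁.Perm l₂ := (List.perm_ext_iff_of_nodup n₁ n₂).2 hmem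
  exact List.Perm.eq_of_pairwise
    (fun a b _ _ hab hba => absurd hba (not_lt.2 (le_of_lt hab))) h₁ h₂ hperm

-- both inner loops compute pvF
lemma pvCountA_eq (polygons : List (List (Int × Int))) (x : Int) :
    pvCountA polygons x = pvF (polygons.map pvSpan) x := by
  unfold pvCountA pvF
  show polygons.foldl (fun count polygon =>
    if pvLo (pvSpan polygon) ≤ x ∧ x ≤ pvHi (pvSpan polygon) then count + 1 else count) 0 = _
  rw [PySem.List.foldl_ite_add_one
    (fun polygon => pvLo (pvSpan polygon) ≤ x ∧ x ≤ pvHi (pvSpan polygon))]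
  simp only [zero_add, List.countP_map]
  exact congrArg _ (List.countP_congr (fun s _ => by simp [pvCover]))

lemma pvCountB_eq (spans : List (Int × Int)) (x : Int) :
    pvCountB spans x = pvF spans x := by
  unfold pvCountB pvF
  rw [PySem.List.foldl_ite_add_one (fun s => pvLo s ≤ x ∧ x ≤ pvHi s)]
  simp only [zero_add]
  exact congrArg _ (List.countP_congr (fun s _ => by simp [pvCover]))

-- the sweep over candidate starts equals the sweep over every column
lemma pv_sweep (spans : List (Int × Int)) (W : Int) :
    (PySem.List.pyRange 0 W 1).foldl (pvStep (pvF spans)) ((0 : Int), (0 : Int)) =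
    (PySem.List.sorted (PySem.Set.ofList (spans.filterMap (fun s =>
      if max (pvLo s) 0 < W then some (max (pvLo s) 0) else none))) (fun x => x) false).foldl
      (pvStep (pvF spans)) ((0 : Int), (0 : Int)) := by
  set raw := spans.filterMap (fun s =>
    if max (pvLo s) 0 < W then some (max (pvLo s) 0) else none) with hraw_def
  set cands := PySem.List.sorted (PySem.Set.ofList raw) (fun x => x) false with hcands_def
  have hcand_mem : ∀ c, c ∈ cands ↔ c ∈ raw := by
    intro c
    rw [hcands_def, PySem.List.mem_sorted, PySem.Set.mem_ofList]
  have hraw_mem : ∀ c ∈ raw, 0 ≤ c ∧ c < W := by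
    intro c hc
    rcases List.mem_filterMap.1 hc with ⟨s, _, hf⟩
    by_cases h : max (pvLo s) 0 < W
    · rw [if_pos h, Option.some_inj] at hf
      subst hf; exact ⟨le_max_right _ _, h⟩
    · rw [if_neg h] at hf; cases hf
  have hfilter : (PySem.List.pyRange 0 W 1).filter (fun x => cands.contains x) = cands := by
    apply pv_eq_of_pairwise_lt_of_mem
    · exact (PySem.List.pairwise_lt_pyRange_one 0 W).filter _
    · exact PySem.List.sorted_ofList_pairwise_lt raw
    · intro x
      simp only [List.mem_filter, PySem.List.mem_pyRange_one, List.contains_iff_mem]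
      constructor
      · rintro ⟨_, h⟩; exact h
      · intro h
        rcases hraw_mem x ((hcand_mem x).1 h) with ⟨h0, hW⟩
        exact ⟨⟨h0, hW⟩, h⟩
  rw [← hfilter]
  apply pv_foldl_step_filter
  · exact PySem.List.pairwise_lt_pyRange_one 0 W
  · intro x hx hpx
    rcases PySem.List.mem_pyRange_one.1 hx with ⟨hx0, hxW⟩
    by_cases hz : pvF spans x ≤ 0
    · exact Or.inl hz
    right
    rw [not_le] at hz
    have hpos : 0 < spans.countP (pvCover x) := by
      unfold pvF at hz; exact_mod_cast hz
    -- the covering spans and the largest candidate start among them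
    have hcov_ne : (spans.filter (pvCover x)).map (fun s => max (pvLo s) 0) ≠ [] := by
      have hne : spans.filter (pvCover x) ≠ [] := by
        intro h
        rw [List.countP_eq_length_filter, h] at hpos
        simp at hpos
      simpa [List.map_eq_nil_iff] using hne
    obtain ⟨m, hm⟩ : ∃ m, PySem.List.max? ((spans.filter (pvCover x)).map (fun s => max (pvLo s) 0)) (fun y => y) = some m := by
      cases hmo : PySem.List.max? ((spans.filter (pvCover x)).map (fun s => max (pvLo s) 0)) (fun y => y) with
      | none => exact absurd ((PySem.List.max?_eq_none_iff _ _).1 hmo) hcov_ne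
      | some m => exact ⟨m, rfl⟩
    have hm_mem := PySem.List.max?_mem hm
    have hm_max : ∀ y ∈ (spans.filter (pvCover x)).map (fun s => max (pvLo s) 0), y ≤ m :=
      PySem.List.max?_isMax hm
    rcases List.mem_map.1 hm_mem with ⟨s0, hs0cov, hs0⟩
    rcases List.mem_filter.1 hs0cov with ⟨hs0spans, hs0cover⟩
    have hcovx : pvLo s0 ≤ x ∧ x ≤ pvHi s0 := by
      simpa [pvCover] using hs0cover
    have hmlex : m ≤ x := by rw [← hs0]; exact max_le hcovx.1 hx0
    have hmW : max (pvLo s0) 0 < W := by rw [hs0]; exact lt_of_le_of_lt hmlex hxW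
    have hm_raw : m ∈ raw := by
      rw [hraw_def]
      exact List.mem_filterMap.2 ⟨s0, hs0spans, by rw [if_pos hmW, hs0]⟩
    have hpm : cands.contains m = true := by
      rw [List.contains_iff_mem]; exact (hcand_mem m).2 hm_raw
    have hmltx : m < x := by
      rcases lt_or_eq_of_le hmlex with h | h
      · exact h
      · subst h
        rw [hpm] at hpx; cases hpx
    refine ⟨m, PySem.List.mem_pyRange_one.2 ⟨by rw [← hs0]; exact le_max_right _ _, lt_trans hmltx hxW⟩, hpm, hmltx, ?_⟩
    unfold pvF
    have : spans.countP (pvCover x) ≤ spans.countP (pvCover m) := by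
      apply List.countP_mono_left
      intro s hs hcx
      have hcx' : pvLo s ≤ x ∧ x ≤ pvHi s := by simpa [pvCover] using hcx
      have hval : max (pvLo s) 0 ≤ m :=
        hm_max _ (List.mem_map_of_mem (List.mem_filter.2 ⟨hs, by simpa [pvCover] using hcx'⟩))
      have : pvLo s ≤ m := le_trans (le_max_left _ _) hval
      simp only [pvCover, decide_eq_true_eq]
      exact ⟨this, le_trans (le_of_lt hmltx) hcx'.2⟩
    exact_mod_cast this

-- the final filter loop of A, as a filter
lemma pv_filterA (polygons : List (List (Int × Int))) (b : Int) :
    polygons.foldl (fun acc polygon =>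
      let s := pvSpan polygon
      if s.1 ≤ b ∧ b ≤ s.2 then acc ++ [polygon] else acc) [] =
    polygons.filter (fun polygon => decide ((pvSpan polygon).1 ≤ b ∧ b ≤ (pvSpan polygon).2)) := by
  rw [PySem.List.foldl_append_ite_eq_filter (fun polygon => (pvSpan polygon).1 ≤ b ∧ b ≤ (pvSpan polygon).2)]
  simp

-- the final comprehension of B, as the same filter
lemma pv_filterB (polygons : List (List (Int × Int))) (b : Int) :
    ((polygons.zip (polygons.map pvSpan)).filter (fun ps => decide (ps.2.1 ≤ b ∧ b ≤ ps.2.2))).map Prod.fst =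
    polygons.filter (fun polygon => decide ((pvSpan polygon).1 ≤ b ∧ b ≤ (pvSpan polygon).2)) := by
  have hzip : polygons.zip (polygons.map pvSpan) = polygons.map (fun a => (a, pvSpan a)) := by
    simpa using (List.zip_map' (f := id) (g := pvSpan) (l := polygons))
  rw [hzip, List.filter_map, List.map_map]
  simp [Function.comp_def]

theorem filter_y_polygons_spec : Claim_equal_filter_y_polygons := by
  intro polygons W image _
  unfold Spec_filter_y_polygons
  show filter_y_polygons polygons W image = filter_y_polygons_alt polygons W image
  unfold filter_y_polygons filter_y_polygons_alt
  have hA : (fun (st : Int × Int) (line_x : Int) =>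
      if pvCountA polygons line_x > st.1 then (pvCountA polygons line_x, line_x) else st) =
      pvStep (pvF (polygons.map pvSpan)) := by
    funext st x
    simp only [pvCountA_eq, pvStep]
  have hB : (fun (st : Int × Int) (c : Int) =>
      if pvCountB (polygons.map pvSpan) c > st.1 then (pvCountB (polygons.map pvSpan) c, c) else st) =
      pvStep (pvF (polygons.map pvSpan)) := by
    funext st x
    simp only [pvCountB_eq, pvStep]
  simp only [hA, hB, pv_sweep (polygons.map pvSpan) W]
  rw [pv_filterA, pv_filterB]
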